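-- pv_equiv track=rewrite | github.com/camibana/Estruturas-de-Dados | lista 4/ex06.py | conta_par_imp
-- ===== SOURCE A (Python) =====
-- def conta_par_imp(vetor):
--     n = len(vetor)
--     cpar = 0
--     cimp = 0
--     for i in range(n):
--         if i % 2 == 0:
--             cpar +=1
--         else:
--             cimp +=1
--
--     return cpar , cimp
-- ===== SOURCE B (Python) =====
-- def conta_par_imp(vetor):
--     # Closed form: among indices 0..n-1, even indices number (n+1)//2, odd n//2.
--     n = len(vetor)
--     return (n + 1) // 2, n // 2
-- ===== Notes on version B (the rewrite author's own statement) =====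
-- stated objective: faster
-- what changed: Replaces the loop over all indices with the closed-form count ((n+1)//2, n//2).
import Mathlib
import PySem

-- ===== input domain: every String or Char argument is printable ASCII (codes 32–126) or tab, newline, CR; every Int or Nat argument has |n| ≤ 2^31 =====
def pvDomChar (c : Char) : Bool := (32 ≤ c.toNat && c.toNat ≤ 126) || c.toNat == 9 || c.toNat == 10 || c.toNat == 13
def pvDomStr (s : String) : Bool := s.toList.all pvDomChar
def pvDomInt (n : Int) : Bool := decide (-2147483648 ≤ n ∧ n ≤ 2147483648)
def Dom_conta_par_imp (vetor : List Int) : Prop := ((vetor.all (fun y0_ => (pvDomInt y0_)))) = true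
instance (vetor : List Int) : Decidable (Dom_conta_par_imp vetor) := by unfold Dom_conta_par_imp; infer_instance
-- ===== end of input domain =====

-- B replaces A's O(n) index loop with the O(1) closed form ((n+1)//2, n//2).


-- ===== PORT A =====
def conta_par_imp (vetor : List Int) : Int × Int :=
  let n : Int := (vetor.length : Int)
  (PySem.List.pyRange 0 n 1).foldl
    (fun (st : Int × Int) (i : Int) =>
      if PySem.Int.mod i 2 = 0 then (st.1 + 1, st.2) else (st.1, st.2 + 1))
    (0, 0)

-- ===== PORT B =====
def conta_par_imp_alt (vetor : List Int) : Int × Int :=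
  let n : Int := (vetor.length : Int)
  (PySem.Int.floordiv (n + 1) 2, PySem.Int.floordiv n 2)

-- ===== PRECONDITION & SPEC =====
def Spec_conta_par_imp (vetor : List Int) (out : Int × Int) : Prop := out = conta_par_imp_alt vetor
instance (vetor : List Int) (out : Int × Int) : Decidable (Spec_conta_par_imp vetor out) := by unfold Spec_conta_par_imp; infer_instance

-- ===== CLAIM (what is proved, stated in full; the proofs are below) =====
def Claim_equal_conta_par_imp : Prop := ∀ (vetor : List Int), Dom_conta_par_imp vetor → Spec_conta_par_imp vetor (conta_par_imp vetor)

-- ===== LEMMAS AND PROOFS =====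

theorem pv_fd2 (a : Int) : PySem.Int.floordiv a 2 = a / 2 :=
  PySem.Int.floordiv_eq_ediv_of_pos (by omega)

-- The loop over range(n) ends at the closed-form pair, by induction on n.
theorem pv_loop_closed (n : Nat) :
    (PySem.List.pyRange 0 (n : Int) 1).foldl
      (fun (st : Int × Int) (i : Int) =>
        if PySem.Int.mod i 2 = 0 then (st.1 + 1, st.2) else (st.1, st.2 + 1))
      (0, 0)
    = (PySem.Int.floordiv ((n : Int) + 1) 2, PySem.Int.floordiv (n : Int) 2) := by
  induction n with
  | zero => decide
  | succ m ih =>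
    have hstep : PySem.List.pyRange 0 ((m : Int) + 1) 1
        = PySem.List.pyRange 0 (m : Int) 1 ++ [(m : Int)] := by
      simpa using PySem.List.pyRange_one_succ_right (a := 0) (b := (m : Int)) (by omega)
    push_cast
    rw [hstep, List.foldl_append, ih]
    simp only [List.foldl_cons, List.foldl_nil]
    rcases Nat.even_or_odd m with ⟨k, hk⟩ | ⟨k, hk⟩
    · have hm : PySem.Int.mod (m : Int) 2 = 0 := by
        rw [PySem.Int.mod_eq_emod_of_pos (by omega)]; omega
      rw [if_pos hm]
      simp only [pv_fd2]
      rw [Prod.mk.injEq]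
      subst hk
      constructor <;> (push_cast; omega)
    · have hm : ¬ PySem.Int.mod (m : Int) 2 = 0 := by
        rw [PySem.Int.mod_eq_emod_of_pos (by omega)]; omega
      rw [if_neg hm]
      simp only [pv_fd2]
      rw [Prod.mk.injEq]
      subst hk
      constructor <;> (push_cast; omega)

-- ===== VERDICT (by name: the statement is the Claim_ definition above) =====
theorem conta_par_imp_spec : Claim_equal_conta_par_imp := by
  intro vetor _
  show conta_par_imp vetor = conta_par_imp_alt vetor
  unfold conta_par_imp conta_par_imp_alt
  exact pv_loop_closed vetor.length
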